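-- pv_equiv track=rewrite | github.com/Ritukumari2003/Typing-Speed-Test | Typing Speed Test/main.py | get_error_words
-- ===== SOURCE A (Python) =====
-- def get_error_words(test_para, test_input):
--     test_word = test_para.split()
--     input_word = test_input.split()
--
--     error_words = []
--     length = min(len(test_word), len(input_word))
--
--     for i in range(length):
--         if test_word[i] != input_word[i]:
--             error_words.append((test_word[i], input_word[i]))
--
--     # compare word by word using zip
--     # for correct, typed in zip(test_words, input_words):
--     #     if correct != typed:
--     #         error_words.append((correct, typed))
--
--     # missing words
--     if len(test_word) > len(input_word):
--         for i in range(length, len(test_word)):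
--             error_words.append((test_word[i], "(missing)"))
--
--     # extra words
--     elif len(input_word) > len(test_word):
--         for i in range(length, len(input_word)):
--             error_words.append(("(extra)", input_word[i]))
--
--     return error_words
-- ===== SOURCE B (Python) =====
-- def get_error_words(test_para, test_input):
--     def go(expected, typed):
--         if not expected:
--             return [("(extra)", w) for w in typed]
--         if not typed:
--             return [(w, "(missing)") for w in expected]
--         head = [(expected[0], typed[0])] if expected[0] != typed[0] else []
--         return head + go(expected[1:], typed[1:])
--     return go(test_para.split(), test_input.split())
-- ===== Notes on version B (the rewrite author's own statement) =====
-- stated objective: alternative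
-- what changed: A's three index loops (min-length mismatch scan, then a length comparison selecting a missing-tail or extra-tail loop) are replaced by structural recursion on the two word lists: each base case emits the whole remaining tail via a map, with no indices, lengths or sentinels.
import Mathlib
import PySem

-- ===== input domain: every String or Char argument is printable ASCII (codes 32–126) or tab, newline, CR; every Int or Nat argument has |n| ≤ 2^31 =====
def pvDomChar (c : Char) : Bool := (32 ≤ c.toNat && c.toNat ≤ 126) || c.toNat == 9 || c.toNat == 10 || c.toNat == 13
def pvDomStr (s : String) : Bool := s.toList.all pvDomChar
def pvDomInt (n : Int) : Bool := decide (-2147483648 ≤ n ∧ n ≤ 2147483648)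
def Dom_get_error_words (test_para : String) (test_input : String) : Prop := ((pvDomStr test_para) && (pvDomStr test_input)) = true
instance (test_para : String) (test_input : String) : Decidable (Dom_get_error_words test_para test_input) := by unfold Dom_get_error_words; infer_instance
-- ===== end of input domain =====

-- B replaces A's three index loops (mismatch scan + length-selected tail loops) by structural
-- recursion on the two word lists, emitting each remaining tail via a map (objective: alternative).

-- ===== PORT A =====
def get_error_words (test_para : String) (test_input : String) : List (String × String) :=
  let test_word := PySem.Str.split₀ test_para
  let input_word := PySem.Str.split₀ test_input
  let error_words : List (String × String) := []
  let length : Int := min (test_word.length : Int) (input_word.length : Int)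
  let error_words := (PySem.List.pyRange 0 length 1).foldl
    (fun acc i =>
      if PySem.List.pyGetD test_word i "" ≠ PySem.List.pyGetD input_word i "" then
        acc ++ [(PySem.List.pyGetD test_word i "", PySem.List.pyGetD input_word i "")]
      else acc) error_words
  if (test_word.length : Int) > (input_word.length : Int) then
    (PySem.List.pyRange length (test_word.length : Int) 1).foldl
      (fun acc i => acc ++ [(PySem.List.pyGetD test_word i "", "(missing)")]) error_words
  else if (input_word.length : Int) > (test_word.length : Int) then
    (PySem.List.pyRange length (input_word.length : Int) 1).foldl
      (fun acc i => acc ++ [("(extra)", PySem.List.pyGetD input_word i "")]) error_words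
  else error_words

-- ===== PORT B =====
def pvGoAlt : List String → List String → List (String × String)
  | [], typed => typed.map (fun w => ("(extra)", w))
  | expected, [] => expected.map (fun w => (w, "(missing)"))
  | e :: expected, t :: typed =>
      (if e ≠ t then [(e, t)] else []) ++ pvGoAlt expected typed

def get_error_words_alt (test_para : String) (test_input : String) : List (String × String) :=
  pvGoAlt (PySem.Str.split₀ test_para) (PySem.Str.split₀ test_input)

-- ===== PRECONDITION & SPEC =====
def Spec_get_error_words (test_para : String) (test_input : String) (out : List (String × String)) : Prop := out = get_error_words_alt test_para test_input
instance (test_para : String) (test_input : String) (out : List (String × String)) : Decidable (Spec_get_error_words test_para test_input out) := by unfold Spec_get_error_words; infer_instance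

-- ===== CLAIM (what is proved, stated in full; the proofs are below) =====
def Claim_equal_get_error_words : Prop := ∀ (test_para : String) (test_input : String), Dom_get_error_words test_para test_input → Spec_get_error_words test_para test_input (get_error_words test_para test_input)

-- ===== LEMMAS AND PROOFS =====

def pvCanon (es ts : List String) : List (String × String) :=
  ((es.zip ts).filter (fun p => p.1 ≠ p.2))
    ++ (es.drop ts.length).map (fun w => (w, "(missing)"))
    ++ (ts.drop es.length).map (fun w => ("(extra)", w))

theorem zipLoop (es ts : List String) (acc : List (String × String)) :
    (PySem.List.pyRange 0 (min (es.length : Int) (ts.length : Int)) 1).foldl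
      (fun acc i =>
        if PySem.List.pyGetD es i "" ≠ PySem.List.pyGetD ts i "" then
          acc ++ [(PySem.List.pyGetD es i "", PySem.List.pyGetD ts i "")]
        else acc) acc
    = acc ++ (es.zip ts).filter (fun p => p.1 ≠ p.2) := by
  have hmin : min (es.length : Int) (ts.length : Int) = ((es.zip ts).length : Int) := by
    simp [List.length_zip]
  rw [hmin]
  rw [PySem.List.foldl_congr_mem _ _ (fun acc i =>
    (fun a (p : String × String) => if p.1 ≠ p.2 then a ++ [id p] else a) acc
      (PySem.List.pyGetD (es.zip ts) i ("", ""))) acc ?_]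
  · rw [PySem.List.foldl_pyRange_zero_pyGetD' (es.zip ts) ("","")
      (fun a (p : String × String) => if p.1 ≠ p.2 then a ++ [id p] else a) acc]
    rw [PySem.List.foldl_append_ite (fun p : String × String => p.1 ≠ p.2) id]
    simp
  · intro a i hi
    rw [PySem.List.mem_pyRange_one] at hi
    have hz : ((es.zip ts).length : Int) = min (es.length : Int) (ts.length : Int) := hmin.symm
    have h1 : i < (es.length : Int) := by omega
    have h2 : i < (ts.length : Int) := by omega
    rw [PySem.List.pyGetD_eq_getElem es "" hi.1 h1, PySem.List.pyGetD_eq_getElem ts "" hi.1 h2]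
    simp [PySem.List.pyGetD_eq_getElem (es.zip ts) ("","") hi.1 hi.2, List.getElem_zip]

theorem tailMissing (es : List String) (a b : Int) (ha : 0 ≤ a) (hb : b = (es.length : Int))
    (acc : List (String × String)) :
    (PySem.List.pyRange a b 1).foldl
      (fun acc i => acc ++ [(PySem.List.pyGetD es i "", "(missing)")]) acc
    = acc ++ (es.drop a.toNat).map (fun w => (w, "(missing)")) := by
  subst hb
  rw [PySem.List.foldl_pyRange_pyGetD' es "" (fun acc w => acc ++ [(w, "(missing)")]) acc ha]
  exact PySem.List.foldl_append_singleton_eq_map _ _ _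

theorem tailExtra (ts : List String) (a b : Int) (ha : 0 ≤ a) (hb : b = (ts.length : Int))
    (acc : List (String × String)) :
    (PySem.List.pyRange a b 1).foldl
      (fun acc i => acc ++ [("(extra)", PySem.List.pyGetD ts i "")]) acc
    = acc ++ (ts.drop a.toNat).map (fun w => ("(extra)", w)) := by
  subst hb
  rw [PySem.List.foldl_pyRange_pyGetD' ts "" (fun acc w => acc ++ [("(extra)", w)]) acc ha]
  exact PySem.List.foldl_append_singleton_eq_map _ _ _

theorem pvA_eq_canon (es ts : List String) :
    (let error_words : List (String × String) := []
     let length : Int := min (es.length : Int) (ts.length : Int)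
     let error_words := (PySem.List.pyRange 0 length 1).foldl
       (fun acc i =>
         if PySem.List.pyGetD es i "" ≠ PySem.List.pyGetD ts i "" then
           acc ++ [(PySem.List.pyGetD es i "", PySem.List.pyGetD ts i "")]
         else acc) error_words
     if (es.length : Int) > (ts.length : Int) then
       (PySem.List.pyRange length (es.length : Int) 1).foldl
         (fun acc i => acc ++ [(PySem.List.pyGetD es i "", "(missing)")]) error_words
     else if (ts.length : Int) > (es.length : Int) then
       (PySem.List.pyRange length (ts.length : Int) 1).foldl
         (fun acc i => acc ++ [("(extra)", PySem.List.pyGetD ts i "")]) error_words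
     else error_words) = pvCanon es ts := by
  dsimp only
  rw [zipLoop]
  rcases lt_trichotomy (ts.length : Int) (es.length : Int) with h | h | h
  · rw [if_pos (by omega)]
    have hmin : min (es.length : Int) (ts.length : Int) = (ts.length : Int) := by omega
    rw [hmin, tailMissing es _ _ (by omega) rfl]
    have hd : ts.drop es.length = [] := List.drop_eq_nil_of_le (by omega)
    simp [pvCanon, hd]
  · rw [if_neg (by omega), if_neg (by omega)]
    have h1 : es.drop ts.length = [] := List.drop_eq_nil_of_le (by omega)
    have h2 : ts.drop es.length = [] := List.drop_eq_nil_of_le (by omega)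
    simp [pvCanon, h1, h2]
  · rw [if_neg (by omega), if_pos (by omega)]
    have hmin : min (es.length : Int) (ts.length : Int) = (es.length : Int) := by omega
    rw [hmin, tailExtra ts _ _ (by omega) rfl]
    have hd : es.drop ts.length = [] := List.drop_eq_nil_of_le (by omega)
    simp [pvCanon, hd]

theorem pvGoAlt_eq_canon (es ts : List String) : pvGoAlt es ts = pvCanon es ts := by
  induction es generalizing ts with
  | nil => cases ts <;> simp [pvGoAlt, pvCanon]
  | cons e es ih =>
    cases ts with
    | nil => simp [pvGoAlt, pvCanon]
    | cons t ts =>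
      by_cases h : e = t <;> simp [pvGoAlt, pvCanon, ih ts, h]

-- ===== VERDICT (by name: the statement is the Claim_ definition above) =====
theorem get_error_words_spec : Claim_equal_get_error_words := by
  intro tp ti _
  unfold Spec_get_error_words get_error_words get_error_words_alt
  rw [pvA_eq_canon, pvGoAlt_eq_canon]
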